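-- pv_equiv track=rewrite | github.com/tishchennko/EGE | Homeworks/homework 06-02-25/task-15.8677.py | f
-- ===== SOURCE A (Python) =====
-- def f(A):
--     for x in range(1, 1000):
--         x_17 = x % 17 == 0
--         B = 80 <= x <= 100
--         f = x_17 <= ((not B) or (A < x + 30))
--         if f != 1:
--             return 0
--     return 1
-- ===== SOURCE B (Python) =====
-- def f(A):
--     # Logical analysis: the loop's condition fails only at x = 85 (the sole
--     # multiple of 17 in [80,100]), where it requires A < 85 + 30 = 115.
--     return 1 if A < 115 else 0
-- ===== Notes on version B (the rewrite author's own statement) =====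
-- stated objective: simpler
-- what changed: Replaced the 999-iteration loop over per-x booleans by the closed-form single comparison A < 115 (x=85 is the only multiple of 17 in [80,100]).
import Mathlib
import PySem

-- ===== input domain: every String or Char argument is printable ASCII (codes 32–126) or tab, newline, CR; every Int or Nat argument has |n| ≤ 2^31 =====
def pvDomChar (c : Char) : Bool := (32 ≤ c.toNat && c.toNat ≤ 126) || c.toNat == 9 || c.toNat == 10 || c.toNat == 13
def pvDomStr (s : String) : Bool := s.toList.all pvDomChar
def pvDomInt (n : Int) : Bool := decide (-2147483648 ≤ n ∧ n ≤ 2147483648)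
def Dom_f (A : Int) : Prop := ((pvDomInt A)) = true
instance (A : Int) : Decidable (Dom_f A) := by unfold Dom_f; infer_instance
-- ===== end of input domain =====

-- B replaces A's 999-iteration loop by the closed-form single comparison A < 115 (simpler).

-- ===== PORT A =====
-- the loop body: for each x, compute x_17, B, f and return 0 on the first failure
def fGo (A : Int) : List Int → Int
  | [] => 1
  | x :: xs =>
    let x17 : Bool := PySem.Int.mod x 17 == 0
    let B : Bool := decide (80 ≤ x) && decide (x ≤ 100)
    let fb : Bool := (!x17) || ((!B) || decide (A < x + 30))   -- x_17 <= (...) on bools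
    if fb ≠ true then 0 else fGo A xs

def f (A : Int) : Int := fGo A (PySem.List.pyRange 1 1000 1)

-- ===== PORT B =====
def f_alt (A : Int) : Int := if A < 115 then 1 else 0

-- ===== PRECONDITION & SPEC =====
def Spec_f (A : Int) (out : Int) : Prop := out = f_alt A
instance (A : Int) (out : Int) : Decidable (Spec_f A out) := by unfold Spec_f; infer_instance

-- ===== CLAIM (what is proved, stated in full; the proofs are below) =====
def Claim_equal_f : Prop := ∀ (A : Int), Dom_f A → Spec_f A (f A)

-- ===== LEMMAS AND PROOFS =====

def fChk (A x : Int) : Bool :=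
  (!(PySem.Int.mod x 17 == 0)) || ((!(decide (80 ≤ x) && decide (x ≤ 100))) || decide (A < x + 30))

lemma fGo_cons (A x : Int) (xs : List Int) :
    fGo A (x :: xs) = if fChk A x = true then fGo A xs else 0 := by
  simp only [fGo, fChk, ne_eq, ite_not]
  rfl

lemma fGo_eq_one (A : Int) (l : List Int) (h : ∀ x ∈ l, fChk A x = true) : fGo A l = 1 := by
  induction l with
  | nil => rfl
  | cons x xs ih =>
    rw [fGo_cons, if_pos (h x (List.mem_cons_self ..))]
    exact ih fun y hy => h y (List.mem_cons_of_mem _ hy)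

lemma fGo_eq_zero (A : Int) (l : List Int) (x : Int) (hx : x ∈ l) (h : fChk A x = false) :
    fGo A l = 0 := by
  induction l with
  | nil => cases hx
  | cons y ys ih =>
    rw [fGo_cons]
    rcases List.mem_cons.mp hx with rfl | hmem
    · rw [if_neg (by simp [h])]
    · by_cases hy : fChk A y = true
      · rw [if_pos hy]; exact ih hmem
      · rw [if_neg hy]

lemma fChk_true_of_lt (A x : Int) (hA : A < 115) : fChk A x = true := by
  unfold fChk
  simp
  omega

lemma fChk_85_false (A : Int) (hA : ¬ A < 115) : fChk A 85 = false := by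
  unfold fChk
  simp
  omega

-- ===== VERDICT (by name: the statement is the Claim_ definition above) =====
theorem f_spec : Claim_equal_f := by
  intro A _
  unfold Spec_f f f_alt
  by_cases hA : A < 115
  · rw [if_pos hA]
    exact fGo_eq_one A _ fun x _ => fChk_true_of_lt A x hA
  · rw [if_neg hA]
    exact fGo_eq_zero A _ 85 (by rw [PySem.List.mem_pyRange_one]; omega) (fChk_85_false A hA)
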